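-- pv_equiv track=rewrite | github.com/MLI-lab/TReconLM | src/data_pkg/IDS_channel.py | generate_alignment_pattern
-- ===== SOURCE A (Python) =====
-- def generate_insertion_pattern(n):
--     """
--     Generates all possible insertion patterns for a sequence of length `n`.
--
--     Each pattern is a string of length `n` with exactly one 'I' (representing an insertion)
--     and all other positions as '-' (no insertion). The 'I' is placed in a all possible different position
--     in to generate all possible pattern.
--
--     Parameters:
--         n (int): Length of the sequence.
--
--     Returns:
--         List[str]: A list of insertion patterns, one for each possible insertion position.
--     """
--     patterns = []
--
--     # Loop through the range of n to generate each pattern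
--     for i in range(n):
--         # Generate a pattern for the current position
--         pattern = '-' * i + 'I' + '-' * (n - i - 1)
--         # Append the generated pattern to the list
--         patterns.append(pattern)
--
--     return patterns
--
-- def generate_alignment_pattern(sequences):
--     """
--     Aligns a list of sequences that may contain insertions marked by 'I', producing equal-length alignment patterns.
--
--     Insertions ('I') represent bases that were not present in the ground truth and are therefore not aligned to any
--     specific position in the original sequence. When multiple sequences have insertions at the same reference position,
--     there is no guarantee these insertions are related or semantically equivalent.
--
--     To avoid falsely aligning such unrelated insertions, each is assigned a unique insertion pattern (e.g., 'I-', '-I'),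
--     spreading insertions across adjacent alignment columns. Sequences without insertions in that column are padded with
--     an equal number of '-' characters to maintain alignment length consistency.
--
--     If no insertions are present in a column, characters are aligned directly (with '-' for deletion). The final output ensures all sequences
--     are of equal length, with insertions and other characters consistently placed.
--
--     Parameters:
--         sequences (List[str]): List of input sequences to align. Each sequence may contain 'I' to indicate an insertion.
--
--     Returns:
--         List[str]: Aligned versions of the input sequences, padded and structured to be of equal length.
--     """
--
--     n = len(sequences)
--
--     alignment_pattern = ['' for _ in range(n)] #One output string per input sequence
--
--     t_vec = [[0] for _ in range(n)]
--     i = 0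
--
--     while (any(len(s) > 0 for s in sequences)): # Keep aligning until all sequences are fully consumed
--
--         column = [s[0] if s != '' else '-' for s in sequences] # Take the first character of each sequence (or '-' if the sequence is empty), that’s the current column we’re aligning: E.g. sequences = ['IATC', 'ICGA', 'ACGT'], column = ['I','I','A']
--         check_value = 'I' in column
--
--         if check_value == False: # if no I in current collumn just align chatacters normally
--             for column_index, char in enumerate(column):
--                 alignment_pattern[column_index] = alignment_pattern[column_index] + char
--
--             sequences = [s[1:] for s in sequences]
--
--         elif check_value == True:
--             check_column = [elem == 'I' for elem in column]
--             sum_column = sum([1 for char in column if char == 'I']) #counts how many sequences have an 'I' at the current position.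
--
--             insertion_pattern = generate_insertion_pattern(sum_column) #generate insertion patter of length number of insertions as, in example above, we  need to align 2 insertions across 2 positions, so we create 2 unique patterns that spread insertions accross colluns --> WHY CAN WE NOT HAVE INSERTIONS AT SAME POSITION?
--             temp = 0
--             for column_index, column_check_value in enumerate(check_column):
--
--                 if column_check_value == True: # Check if this collumn e.g. sequence has insertion, if yes give it one of the insertion patterns, if not, pad with '-' * sum_column
--
--                     alignment_pattern[column_index] =  alignment_pattern[column_index] + insertion_pattern[temp]
--                     sequences[column_index] = sequences[column_index][1:]
--                     temp += 1
--
--                 elif column_check_value == False: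
--                     alignment_pattern[column_index] =  alignment_pattern[column_index] + '-' * sum_column
--
--         i += 1
--     return alignment_pattern
-- ===== SOURCE B (Python) =====
-- def generate_alignment_pattern(sequences):
--     # Two passes: first build a schedule of column events, then render each
--     # sequence independently against that schedule.
--     rem = list(sequences)
--     schedule = []
--     while any(rem):
--         heads = [s[0] if s else '-' for s in rem]
--         parts = [j for j, c in enumerate(heads) if c == 'I']
--         if not parts:
--             schedule.append(None)  # match column
--             rem = [s[1:] for s in rem]
--         else:
--             schedule.append(parts)  # insertion column
--             rem = [s[1:] if j in parts else s for j, s in enumerate(rem)]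
--     out = []
--     for j, s in enumerate(sequences):
--         pieces = []
--         for ev in schedule:
--             if ev is None:
--                 pieces.append(s[0] if s else '-')
--                 s = s[1:]
--             elif j in ev:
--                 r = ev.index(j)
--                 pieces.append('-' * r + 'I' + '-' * (len(ev) - r - 1))
--                 s = s[1:]
--             else:
--                 pieces.append('-' * len(ev))
--         out.append(''.join(pieces))
--     return out
-- ===== Notes on version B (the rewrite author's own statement) =====
-- stated objective: alternative
-- what changed: A builds all aligned rows simultaneously in one column-wise loop that extends every output string per column; B first builds a schedule of column events (match / insertion-with-participants) and then renders each output row independently by walking the schedule, a table-build plus row-wise render of the same cost.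
import Mathlib
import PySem

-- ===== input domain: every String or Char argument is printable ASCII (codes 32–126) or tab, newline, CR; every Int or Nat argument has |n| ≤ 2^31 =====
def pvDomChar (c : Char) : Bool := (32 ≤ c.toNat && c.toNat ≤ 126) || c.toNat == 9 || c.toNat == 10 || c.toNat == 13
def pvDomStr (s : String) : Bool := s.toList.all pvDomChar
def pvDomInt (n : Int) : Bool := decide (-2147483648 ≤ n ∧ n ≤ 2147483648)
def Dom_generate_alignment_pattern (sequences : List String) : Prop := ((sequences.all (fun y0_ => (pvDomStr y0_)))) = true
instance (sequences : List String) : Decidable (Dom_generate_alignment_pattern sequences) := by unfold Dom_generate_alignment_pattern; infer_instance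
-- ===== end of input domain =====

-- B replaces A's single column-wise loop (which extends all output rows at once) by two passes:
-- build a schedule of column events, then render each output row independently; objective: alternative
-- decomposition, same cost.  Equivalence is about the RETURN value only: A mutates its argument list
-- in place in the insertion branch, B never does.

-- ===== PORT A =====
-- first char of a sequence, '-' if empty (s[0] if s != '' else '-')
def pvHead : List Char → Char
  | [] => '-'
  | c :: _ => c

-- generate_insertion_pattern(n)
def pvGIP (n : Nat) : List (List Char) :=
  (List.range n).foldl
    (fun patterns i => patterns ++ [List.replicate i '-' ++ 'I' :: List.replicate (n - i - 1) '-']) []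

-- the while-loop of A; fuel = total remaining length + 1 is a totality guard only
def pvLoopA : Nat → List (List Char) → List (List Char) → List (List Char)
  | 0, align, _ => align
  | fuel + 1, align, seqs =>
    if seqs.any (fun s => !s.isEmpty) then
      let column := seqs.map pvHead
      if column.contains 'I' = false then
        pvLoopA fuel (List.zipWith (fun a c => a ++ [c]) align column) (seqs.map List.tail)
      else
        let sum_column := ((column.filter (fun c => c == 'I')).map (fun _ => (1 : Nat))).sum
        let pats := pvGIP sum_column
        let st :=
          ((align.zip seqs).zip (column.map (fun c => c == 'I'))).foldl
            (fun (acc : List (List Char) × List (List Char) × Nat) x =>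
              if x.2 then
                (acc.1 ++ [x.1.1 ++ pats.getD acc.2.2 []], acc.2.1 ++ [x.1.2.tail], acc.2.2 + 1)
              else
                (acc.1 ++ [x.1.1 ++ List.replicate sum_column '-'], acc.2.1 ++ [x.1.2], acc.2.2))
            (([], [], 0) : List (List Char) × List (List Char) × Nat)
        pvLoopA fuel st.1 st.2.1
    else align

def generate_alignment_pattern (sequences : List String) : List String :=
  let seqs := sequences.map String.toList
  (pvLoopA ((seqs.map List.length).sum + 1) (seqs.map (fun _ => [])) seqs).map String.ofList

-- ===== PORT B =====
-- first char of a sequence, '-' if empty (s[0] if s else '-')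
def pvHeadB : List Char → Char
  | [] => '-'
  | c :: _ => c

-- pass 1: the schedule; an event is none (match column) or some parts (insertion column)
def pvSched : Nat → List (List Char) → List (Option (List Int))
  | 0, _ => []
  | fuel + 1, rem =>
    if rem.any (fun s => !s.isEmpty) then
      let heads := rem.map pvHeadB
      let parts := ((PySem.List.enumerate heads 0).filter (fun jc => jc.2 == 'I')).map (·.1)
      if parts.isEmpty then
        none :: pvSched fuel (rem.map List.tail)
      else
        some parts ::
          pvSched fuel
            ((PySem.List.enumerate rem 0).map (fun js => if js.1 ∈ parts then js.2.tail else js.2))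
    else []

-- pass 2: render row j against the schedule, consuming its own sequence
def pvRender (j : Int) : List Char → List (Option (List Int)) → List Char
  | _, [] => []
  | s, none :: evs =>
    (match s with
     | [] => '-' :: pvRender j [] evs
     | c :: t => c :: pvRender j t evs)
  | s, some parts :: evs =>
    match PySem.List.index? parts j with
    | some r => (List.replicate r '-' ++ 'I' :: List.replicate (parts.length - r - 1) '-') ++ pvRender j s.tail evs
    | none => List.replicate parts.length '-' ++ pvRender j s evs

def generate_alignment_pattern_alt (sequences : List String) : List String :=
  let seqs := sequences.map String.toList
  let schedule := pvSched ((seqs.map List.length).sum + 1) seqs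
  (PySem.List.enumerate seqs 0).map (fun js => String.ofList (pvRender js.1 js.2 schedule))

-- ===== PRECONDITION & SPEC =====
def Spec_generate_alignment_pattern (sequences : List String) (out : List String) : Prop := out = generate_alignment_pattern_alt sequences
instance (sequences : List String) (out : List String) : Decidable (Spec_generate_alignment_pattern sequences out) := by unfold Spec_generate_alignment_pattern; infer_instance

-- ===== CLAIM (what is proved, stated in full; the proofs are below) =====
def Claim_equal_generate_alignment_pattern : Prop := ∀ (sequences : List String), Dom_generate_alignment_pattern sequences → Spec_generate_alignment_pattern sequences (generate_alignment_pattern sequences)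

-- ===== LEMMAS AND PROOFS =====

theorem sum_ones {A : Type} (l : List A) : (l.map (fun _ => (1 : Nat))).sum = l.length := by
  induction l with
  | nil => rfl
  | cons x xs ih => simp; omega

theorem pvHeadB_eq : pvHeadB = pvHead := funext fun s => by cases s <;> rfl

-- pvGIP in closed form
theorem pvGIP_eq (n : Nat) :
    pvGIP n = (List.range n).map (fun i => List.replicate i '-' ++ 'I' :: List.replicate (n - i - 1) '-') := by
  unfold pvGIP
  exact PySem.List.foldl_append_singleton_eq_map _ _ []

-- positions (from start s0) whose entry is 'I'; definitionally the `parts` of pvSched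
def pvPos (cs : List Char) (s0 : Int) : List Int :=
  ((PySem.List.enumerate cs s0).filter (fun jc => jc.2 == 'I')).map (·.1)

theorem pvPos_cons (c : Char) (cs : List Char) (s0 : Int) :
    pvPos (c :: cs) s0 = (if c == 'I' then [s0] else []) ++ pvPos cs (s0 + 1) := by
  simp only [pvPos, PySem.List.enumerate_cons, List.filter_cons]
  split <;> simp_all

theorem mem_pvPos_ge {cs : List Char} {s0 j : Int} (h : j ∈ pvPos cs s0) : s0 ≤ j := by
  induction cs generalizing s0 with
  | nil => simp [pvPos, PySem.List.enumerate_nil] at h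
  | cons c cs ih =>
    rw [pvPos_cons] at h
    rcases List.mem_append.1 h with h | h
    · split at h <;> simp_all
    · have := ih h; omega

theorem length_pvPos (cs : List Char) (s0 : Int) :
    (pvPos cs s0).length = (cs.filter (fun c => c == 'I')).length := by
  induction cs generalizing s0 with
  | nil => simp [pvPos, PySem.List.enumerate_nil]
  | cons c cs ih =>
    rw [pvPos_cons]
    simp only [List.length_append, ih, List.filter_cons]
    split <;> simp_all <;> omega

theorem index?_some_lt {A : Type} [BEq A] [LawfulBEq A] {xs : List A} {v : A} {r : Nat}
    (h : PySem.List.index? xs v = some r) : r < xs.length := by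
  simp only [PySem.List.index?] at h
  obtain ⟨hlt, -, -⟩ := List.idxOf?_eq_some_iff.1 h
  exact hlt

theorem mem_iff_index?_isSome {A : Type} [BEq A] [LawfulBEq A] (xs : List A) (v : A) :
    v ∈ xs ↔ (PySem.List.index? xs v).isSome := by
  simp [PySem.List.index?]

theorem index?_cons' {A : Type} [BEq A] (x : A) (xs : List A) (v : A) :
    PySem.List.index? (x :: xs) v = if x == v then some 0 else (PySem.List.index? xs v).map (· + 1) := by
  simp only [PySem.List.index?, List.idxOf?_cons]

theorem index?_pvPos (cs : List Char) (s0 : Int) (i : Nat) (hi : i < cs.length) :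
    PySem.List.index? (pvPos cs s0) (s0 + i) =
      if cs[i] == 'I'
      then some (((cs.take i).filter (fun c => c == 'I')).length)
      else none := by
  induction cs generalizing s0 i with
  | nil => simp at hi
  | cons c cs ih =>
    rw [pvPos_cons]
    cases i with
    | zero =>
      simp only [List.getElem_cons_zero, List.take_zero, List.filter_nil, List.length_nil]
      by_cases hc : c == 'I'
      · simp [hc, PySem.List.index?, List.idxOf?_cons]
      · simp only [hc, Bool.false_eq_true, if_false, List.nil_append]
        rw [show s0 + (0:Nat) = s0 by omega]
        cases h : PySem.List.index? (pvPos cs (s0+1)) s0 with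
        | none => simp
        | some r =>
          exfalso
          have : s0 ∈ pvPos cs (s0+1) := by
            rw [mem_iff_index?_isSome, h]; rfl
          have := mem_pvPos_ge this; omega
    | succ i =>
      simp only [List.getElem_cons_succ, List.take_succ_cons, List.filter_cons]
      have hi' : i < cs.length := by simp at hi; omega
      have key : PySem.List.index? (pvPos cs (s0+1)) (s0 + (i+1:Nat)) =
          if cs[i]'hi' == 'I' then some (((cs.take i).filter (fun c => c == 'I')).length) else none := by
        rw [show s0 + ((i:Nat)+1:Nat) = (s0+1) + (i:Nat) by push_cast; omega]
        exact ih (s0+1) i hi'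
      by_cases hc : c == 'I'
      · simp only [hc, if_true, List.singleton_append, index?_cons']
        have hne : (s0 == s0 + ((i:Nat)+1:Nat)) = false := by
          simp; omega
        rw [hne]
        simp only [Bool.false_eq_true, if_false, key]
        split <;> simp [List.length_cons]
      · simp only [hc, Bool.false_eq_true, if_false, List.nil_append]
        exact key

-- the zipWith-render form that pvLoopA is proved equal to
def pvTarget (align seqs : List (List Char)) (evs : List (Option (List Int))) (s0 : Int) :
    List (List Char) :=
  List.zipWith (fun a js => a ++ pvRender js.1 js.2 evs) align (PySem.List.enumerate seqs s0)

theorem pvRender_nil (j : Int) (s : List Char) : pvRender j s [] = [] := rfl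

theorem pvRender_none (j : Int) (s : List Char) (evs : List (Option (List Int))) :
    pvRender j s (none :: evs) = pvHead s :: pvRender j s.tail evs := by
  cases s <;> rfl

theorem pvRender_ins (j : Int) (s : List Char) (parts : List Int) (evs : List (Option (List Int))) :
    pvRender j s (some parts :: evs) =
      pvRender j s [some parts] ++ pvRender j (if j ∈ parts then s.tail else s) evs := by
  cases h : PySem.List.index? parts j with
  | none =>
    have hm : ¬ j ∈ parts := by rw [mem_iff_index?_isSome, h]; simp
    simp only [pvRender]
    rw [h]
    simp [hm]
  | some r =>
    have hm : j ∈ parts := by rw [mem_iff_index?_isSome, h]; rfl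
    simp only [pvRender]
    rw [h]
    simp [hm]

theorem pvTarget_cons (a s : List Char) (al ss : List (List Char))
    (evs : List (Option (List Int))) (s0 : Int) :
    pvTarget (a :: al) (s :: ss) evs s0 =
      (a ++ pvRender s0 s evs) :: pvTarget al ss evs (s0 + 1) := by
  simp [pvTarget, PySem.List.enumerate_cons]

theorem pvTarget_nil (align seqs : List (List Char)) (s0 : Int) (h : align.length = seqs.length) :
    pvTarget align seqs [] s0 = align := by
  induction align generalizing seqs s0 with
  | nil => rfl
  | cons a al ih =>
    cases seqs with
    | nil => simp at h
    | cons s ss =>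
      simp only [pvTarget, PySem.List.enumerate_cons, List.zipWith_cons_cons, pvRender_nil,
        List.append_nil] at *
      exact congrArg _ (ih ss (s0+1) (by simpa using h))

theorem pvTarget_match (align seqs : List (List Char)) (evs : List (Option (List Int))) (s0 : Int) :
    pvTarget align seqs (none :: evs) s0 =
      pvTarget (List.zipWith (fun a c => a ++ [c]) align (seqs.map pvHead))
        (seqs.map List.tail) evs s0 := by
  induction align generalizing seqs s0 with
  | nil => rfl
  | cons a al ih =>
    cases seqs with
    | nil => rfl
    | cons s ss =>
      rw [List.map_cons, List.map_cons, List.zipWith_cons_cons, pvTarget_cons, pvTarget_cons,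
        pvRender_none, ih ss (s0+1)]
      simp

theorem pvTarget_append_insert (align seqs : List (List Char)) (parts : List Int)
    (evs : List (Option (List Int))) (s0 : Int) :
    pvTarget align seqs (some parts :: evs) s0 =
      pvTarget (pvTarget align seqs [some parts] s0)
        ((PySem.List.enumerate seqs s0).map (fun js => if js.1 ∈ parts then js.2.tail else js.2))
        evs s0 := by
  induction align generalizing seqs s0 with
  | nil => rfl
  | cons a al ih =>
    cases seqs with
    | nil => rfl
    | cons s ss =>
      rw [pvTarget_cons, pvTarget_cons, PySem.List.enumerate_cons, List.map_cons,
        pvTarget_cons, pvRender_ins, ih ss (s0+1)]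
      simp

theorem pvRender_single_some {j : Int} {parts : List Int} {r : Nat} (s : List Char)
    (h : PySem.List.index? parts j = some r) :
    pvRender j s [some parts] =
      List.replicate r '-' ++ 'I' :: List.replicate (parts.length - r - 1) '-' := by
  simp only [pvRender]
  rw [h]
  simp

theorem pvRender_single_none {j : Int} {parts : List Int} (s : List Char)
    (h : PySem.List.index? parts j = none) :
    pvRender j s [some parts] = List.replicate parts.length '-' := by
  simp only [pvRender]
  rw [h]
  simp

theorem pvGIP_getD {k t : Nat} (ht : t < k) :
    (pvGIP k).getD t [] = List.replicate t '-' ++ 'I' :: List.replicate (k - t - 1) '-' := by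
  rw [pvGIP_eq]
  rw [List.getD_eq_getElem?_getD, List.getElem?_map, List.getElem?_range ht]
  rfl

-- the big insertion-column step
theorem pvFold_insert (parts : List Int) (k : Nat) (pats : List (List Char))
    (hpats : pats = pvGIP k) (hplen : parts.length = k) :
    ∀ (align seqs : List (List Char)) (A0 S0 : List (List Char)) (t0 : Nat) (s0 : Int),
      align.length = seqs.length →
      (∀ i (hi : i < seqs.length),
        PySem.List.index? parts (s0 + i) =
          if pvHead seqs[i] == 'I'
          then some (t0 + ((seqs.take i).filter (fun s => pvHead s == 'I')).length)
          else none) →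
      ((align.zip seqs).zip ((seqs.map pvHead).map (fun c => c == 'I'))).foldl
        (fun (acc : List (List Char) × List (List Char) × Nat) x =>
          if x.2 then
            (acc.1 ++ [x.1.1 ++ pats.getD acc.2.2 []], acc.2.1 ++ [x.1.2.tail], acc.2.2 + 1)
          else
            (acc.1 ++ [x.1.1 ++ List.replicate k '-'], acc.2.1 ++ [x.1.2], acc.2.2))
        ((A0, S0, t0) : List (List Char) × List (List Char) × Nat)
        = (A0 ++ pvTarget align seqs [some parts] s0,
           S0 ++ (PySem.List.enumerate seqs s0).map
             (fun js => if js.1 ∈ parts then js.2.tail else js.2),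
           t0 + (seqs.filter (fun s => pvHead s == 'I')).length) := by
  intro align
  induction align with
  | nil =>
    intro seqs A0 S0 t0 s0 hlen hidx
    cases seqs with
    | nil => simp [pvTarget, PySem.List.enumerate_nil]
    | cons s ss => simp at hlen
  | cons a al ih =>
    intro seqs A0 S0 t0 s0 hlen hidx
    cases seqs with
    | nil => simp at hlen
    | cons s ss =>
      have hlen' : al.length = ss.length := by simpa using hlen
      have h0 := hidx 0 (by simp)
      simp only [List.getElem_cons_zero, List.take_zero, List.filter_nil, List.length_nil,
        Nat.cast_zero, add_zero] at h0
      by_cases hc : (pvHead s == 'I') = true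
      · have hsome : PySem.List.index? parts s0 = some t0 := by rw [h0, if_pos hc]
        have htk : t0 < k := hplen ▸ index?_some_lt hsome
        have hmem : s0 ∈ parts := by rw [mem_iff_index?_isSome, hsome]; rfl
        have hidx' : ∀ i (hi : i < ss.length),
            PySem.List.index? parts ((s0+1) + i) =
              if pvHead ss[i] == 'I'
              then some ((t0+1) + ((ss.take i).filter (fun s => pvHead s == 'I')).length)
              else none := by
          intro i hi
          have h1 := hidx (i+1) (by simp; omega)
          simp only [List.getElem_cons_succ, List.take_succ_cons, List.filter_cons, hc,
            if_true] at h1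
          rw [show s0 + ((i:Nat)+1:Nat) = (s0+1) + (i:Nat) by push_cast; omega] at h1
          rw [h1]
          split <;> simp <;> omega
        simp only [List.zip_cons_cons, List.map_cons, hc, if_true, List.foldl_cons]
        rw [ih ss (A0 ++ [a ++ pats.getD t0 []]) (S0 ++ [s.tail]) (t0+1) (s0+1) hlen' hidx']
        rw [pvTarget_cons, PySem.List.enumerate_cons, List.map_cons, List.filter_cons]
        simp only [hc, if_true, hmem]
        simp only [Prod.mk.injEq]
        refine ⟨?_, ?_, by simp [List.length_cons]; omega⟩
        · rw [pvRender_single_some s hsome, hpats, pvGIP_getD htk, hplen]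
          simp
        · simp
      · have hnone : PySem.List.index? parts s0 = none := by rw [h0, if_neg hc]
        have hmem : ¬ s0 ∈ parts := by rw [mem_iff_index?_isSome, hnone]; simp
        have hidx' : ∀ i (hi : i < ss.length),
            PySem.List.index? parts ((s0+1) + i) =
              if pvHead ss[i] == 'I'
              then some (t0 + ((ss.take i).filter (fun s => pvHead s == 'I')).length)
              else none := by
          intro i hi
          have h1 := hidx (i+1) (by simp; omega)
          simp only [List.getElem_cons_succ, List.take_succ_cons, List.filter_cons, hc,
            Bool.false_eq_true, if_false] at h1
          rw [show s0 + ((i:Nat)+1:Nat) = (s0+1) + (i:Nat) by push_cast; omega] at h1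
          exact h1
        simp only [List.zip_cons_cons, List.map_cons, hc, Bool.false_eq_true, if_false,
          List.foldl_cons]
        rw [ih ss (A0 ++ [a ++ List.replicate k '-']) (S0 ++ [s]) t0 (s0+1) hlen' hidx']
        rw [pvTarget_cons, PySem.List.enumerate_cons, List.map_cons, List.filter_cons]
        simp only [hc, Bool.false_eq_true, if_false, hmem]
        simp only [Prod.mk.injEq]
        refine ⟨?_, ?_, trivial⟩
        · rw [pvRender_single_none s hnone, hplen]
          simp
        · simp

theorem pvPos_empty_iff (cs : List Char) (s0 : Int) :
    pvPos cs s0 = [] ↔ cs.contains 'I' = false := by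
  rw [← List.length_eq_zero_iff, length_pvPos, List.length_eq_zero_iff]
  simp only [List.filter_eq_nil_iff, beq_iff_eq]
  constructor
  · intro hall
    simp only [List.contains_eq_mem, decide_eq_false_iff_not]
    exact fun hm => hall _ hm rfl
  · intro hnc a ha he
    simp only [List.contains_eq_mem, decide_eq_false_iff_not] at hnc
    exact hnc (he ▸ ha)

theorem length_pvTarget (align seqs : List (List Char)) (evs : List (Option (List Int)))
    (s0 : Int) : (pvTarget align seqs evs s0).length = min align.length seqs.length := by
  simp [pvTarget, PySem.List.length_enumerate]

theorem pvTarget_blank (seqs : List (List Char)) (evs : List (Option (List Int))) :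
    ∀ s0, pvTarget (seqs.map (fun _ => [])) seqs evs s0 =
      (PySem.List.enumerate seqs s0).map (fun js => pvRender js.1 js.2 evs) := by
  induction seqs with
  | nil => intro s0; rfl
  | cons s ss ih =>
    intro s0
    simp only [List.map_cons, PySem.List.enumerate_cons, pvTarget, List.zipWith_cons_cons,
      List.nil_append]
    rw [← pvTarget, ih (s0+1)]

-- main lemma: A's loop equals "render every row against the schedule"
theorem pvLoopA_eq (fuel : Nat) :
    ∀ (align seqs : List (List Char)), align.length = seqs.length →
      pvLoopA fuel align seqs = pvTarget align seqs (pvSched fuel seqs) 0 := by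
  induction fuel with
  | zero =>
    intro align seqs h
    rw [show pvSched 0 seqs = [] from rfl, pvTarget_nil align seqs 0 h]
    rfl
  | succ fuel ih =>
    intro align seqs h
    by_cases hany : (seqs.any (fun s => !s.isEmpty)) = true
    · by_cases hI : (seqs.map pvHead).contains 'I' = true
      · -- insertion column
        have hparts : ((PySem.List.enumerate (seqs.map pvHeadB) 0).filter
            (fun jc => jc.2 == 'I')).map (·.1) = pvPos (seqs.map pvHead) 0 := by
          rw [pvHeadB_eq]; rfl
        have hpe : (pvPos (seqs.map pvHead) 0).isEmpty = false := by
          rw [List.isEmpty_eq_false_iff]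
          intro hnil
          rw [pvPos_empty_iff] at hnil
          rw [hnil] at hI
          exact Bool.false_ne_true hI
        have hsum : (((seqs.map pvHead).filter (fun c => c == 'I')).map
            (fun _ => (1 : Nat))).sum = ((seqs.map pvHead).filter (fun c => c == 'I')).length :=
          sum_ones _
        have hplen : (pvPos (seqs.map pvHead) 0).length =
            ((seqs.map pvHead).filter (fun c => c == 'I')).length := length_pvPos _ _
        have hidx : ∀ i (hi : i < seqs.length),
            PySem.List.index? (pvPos (seqs.map pvHead) 0) ((0:Int) + i) =
              if pvHead seqs[i] == 'I'
              then some (0 + ((seqs.take i).filter (fun s => pvHead s == 'I')).length)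
              else none := by
          intro i hi
          rw [index?_pvPos (seqs.map pvHead) 0 i (by simpa using hi)]
          simp only [List.getElem_map, ← List.map_take, List.filter_map, List.length_map]
          simp [Function.comp_def]
        simp only [pvLoopA, pvSched, hany, if_true, hparts, hpe, Bool.false_eq_true, if_false,
          hI, Bool.true_eq_false]
        rw [hsum]
        rw [pvFold_insert (pvPos (seqs.map pvHead) 0)
          ((seqs.map pvHead).filter (fun c => c == 'I')).length (pvGIP _) rfl hplen
          align seqs [] [] 0 0 h hidx]
        simp only [List.nil_append]
        rw [pvTarget_append_insert align seqs (pvPos (seqs.map pvHead) 0)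
          (pvSched fuel ((PySem.List.enumerate seqs 0).map
            (fun js => if js.1 ∈ pvPos (seqs.map pvHead) 0 then js.2.tail else js.2))) 0]
        exact ih _ _ (by simp [length_pvTarget, PySem.List.length_enumerate, h])
      · -- match column
        have hImem : ¬ 'I' ∈ seqs.map pvHead := by
          simpa using hI
        have hpe : (pvPos (seqs.map pvHead) 0).isEmpty = true := by
          rw [List.isEmpty_iff, pvPos_empty_iff]
          simpa using hI
        have hparts : ((PySem.List.enumerate (seqs.map pvHeadB) 0).filter
            (fun jc => jc.2 == 'I')).map (·.1) = pvPos (seqs.map pvHead) 0 := by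
          rw [pvHeadB_eq]; rfl
        simp only [pvLoopA, pvSched, hany, if_true, hparts, hpe,
          show ((seqs.map pvHead).contains 'I' = false) from by simpa using hI]
        rw [ih _ _ (by simp [h])]
        rw [pvTarget_match]
    · simp only [pvLoopA, pvSched, hany, Bool.false_eq_true, if_false]
      exact (pvTarget_nil align seqs 0 h).symm

-- ===== VERDICT (by name: the statement is the Claim_ definition above) =====
theorem generate_alignment_pattern_spec : Claim_equal_generate_alignment_pattern := by
  intro sequences _
  show generate_alignment_pattern sequences = generate_alignment_pattern_alt sequences
  show (pvLoopA (((sequences.map String.toList).map List.length).sum + 1)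
      ((sequences.map String.toList).map (fun _ => [])) (sequences.map String.toList)).map
        String.ofList =
    (PySem.List.enumerate (sequences.map String.toList) 0).map
      (fun js => String.ofList (pvRender js.1 js.2
        (pvSched (((sequences.map String.toList).map List.length).sum + 1)
          (sequences.map String.toList))))
  rw [pvLoopA_eq _ _ _ (by simp), pvTarget_blank, List.map_map]
  rfl
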